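-- pv_equiv track=rewrite | github.com/emilyzfliu/balatro-gym | algorithms/utils.py | enumerate_possible_hand_indices
-- ===== SOURCE A (Python) =====
-- def enumerate_possible_hand_indices(hand_size):
--     indices = []
--     # size 1
--     for i in range(hand_size):
--         indices.append([i])
--
--     # size 2
--     for i in range(hand_size):
--         for j in range(i + 1, hand_size):
--             indices.append([i, j])
--
--     # size 3
--     for i in range(hand_size):
--         for j in range(i + 1, hand_size):
--             for k in range(j + 1, hand_size):
--                 indices.append([i, j, k])
--
--     # size 4
--     for i in range(hand_size):
--         for j in range(i + 1, hand_size):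
--             for k in range(j + 1, hand_size):
--                 for l in range(k + 1, hand_size):
--                     indices.append([i, j, k, l])
--
--     # size 5
--     for i in range(hand_size):
--         for j in range(i + 1, hand_size):
--             for k in range(j + 1, hand_size):
--                 for l in range(k + 1, hand_size):
--                     for m in range(l + 1, hand_size):
--                         indices.append([i, j, k, l, m])
--
--     return indices
-- ===== SOURCE B (Python) =====
-- def enumerate_possible_hand_indices(hand_size):
--     indices = []
--
--     def build(start, remaining, current):
--         if remaining == 0:
--             indices.append(list(current))
--             return
--         for i in range(start, hand_size):
--             current.append(i)
--             build(i + 1, remaining - 1, current)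
--             current.pop()
--
--     for size in range(1, 6):
--         build(0, size, [])
--     return indices
-- ===== Notes on version B (the rewrite author's own statement) =====
-- stated objective: simpler
-- what changed: Replaces the five unrolled nested-loop blocks with one recursive backtracking generator build(start, remaining, current), driven once per target size 1..5.
import Mathlib
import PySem

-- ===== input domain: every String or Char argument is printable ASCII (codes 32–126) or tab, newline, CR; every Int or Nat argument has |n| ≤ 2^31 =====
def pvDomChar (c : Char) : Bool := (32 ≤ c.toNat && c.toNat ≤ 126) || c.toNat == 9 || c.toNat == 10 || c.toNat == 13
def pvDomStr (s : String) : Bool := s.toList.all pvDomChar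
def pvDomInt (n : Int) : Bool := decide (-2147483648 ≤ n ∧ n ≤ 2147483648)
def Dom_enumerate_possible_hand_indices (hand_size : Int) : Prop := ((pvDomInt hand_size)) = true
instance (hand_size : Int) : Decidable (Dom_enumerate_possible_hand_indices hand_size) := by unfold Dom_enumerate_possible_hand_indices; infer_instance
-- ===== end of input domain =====

-- B replaces A's five unrolled nested-loop blocks by one recursive backtracking
-- generator driven once per target size 1..5; same output, same asymptotic cost (objective: simpler).

-- ===== PORT A =====
def enumerate_possible_hand_indices (hand_size : Int) : List (List Int) :=
  let indices : List (List Int) := []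
  -- size 1
  let indices := (PySem.List.pyRange 0 hand_size 1).foldl
    (fun acc i => acc ++ [[i]]) indices
  -- size 2
  let indices := (PySem.List.pyRange 0 hand_size 1).foldl (fun acc i =>
    (PySem.List.pyRange (i+1) hand_size 1).foldl (fun acc j =>
      acc ++ [[i, j]]) acc) indices
  -- size 3
  let indices := (PySem.List.pyRange 0 hand_size 1).foldl (fun acc i =>
    (PySem.List.pyRange (i+1) hand_size 1).foldl (fun acc j =>
      (PySem.List.pyRange (j+1) hand_size 1).foldl (fun acc k =>
        acc ++ [[i, j, k]]) acc) acc) indices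
  -- size 4
  let indices := (PySem.List.pyRange 0 hand_size 1).foldl (fun acc i =>
    (PySem.List.pyRange (i+1) hand_size 1).foldl (fun acc j =>
      (PySem.List.pyRange (j+1) hand_size 1).foldl (fun acc k =>
        (PySem.List.pyRange (k+1) hand_size 1).foldl (fun acc l =>
          acc ++ [[i, j, k, l]]) acc) acc) acc) indices
  -- size 5
  let indices := (PySem.List.pyRange 0 hand_size 1).foldl (fun acc i =>
    (PySem.List.pyRange (i+1) hand_size 1).foldl (fun acc j =>
      (PySem.List.pyRange (j+1) hand_size 1).foldl (fun acc k =>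
        (PySem.List.pyRange (k+1) hand_size 1).foldl (fun acc l =>
          (PySem.List.pyRange (l+1) hand_size 1).foldl (fun acc m =>
            acc ++ [[i, j, k, l, m]]) acc) acc) acc) acc) indices
  indices

-- ===== PORT B =====
-- build(start, remaining, current): B only ever calls it with remaining ∈ {0,…,5},
-- so the nonnegative counter is a Nat here; returns the completions it would append.
def pvBuild (n : Int) : Nat → Int → List Int → List (List Int)
  | 0, _, current => [current]                      -- indices.append(list(current))
  | r + 1, start, current =>
      (PySem.List.pyRange start n 1).foldl
        (fun acc i => acc ++ pvBuild n r (i + 1) (current ++ [i])) []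

def enumerate_possible_hand_indices_alt (hand_size : Int) : List (List Int) :=
  (PySem.List.pyRange 1 6 1).foldl
    (fun acc size => acc ++ pvBuild hand_size size.toNat 0 []) []

-- ===== PRECONDITION & SPEC =====
def Spec_enumerate_possible_hand_indices (hand_size : Int) (out : List (List Int)) : Prop := out = enumerate_possible_hand_indices_alt hand_size
instance (hand_size : Int) (out : List (List Int)) : Decidable (Spec_enumerate_possible_hand_indices hand_size out) := by unfold Spec_enumerate_possible_hand_indices; infer_instance

-- ===== CLAIM (what is proved, stated in full; the proofs are below) =====
def Claim_equal_enumerate_possible_hand_indices : Prop := ∀ (hand_size : Int), Dom_enumerate_possible_hand_indices hand_size → Spec_enumerate_possible_hand_indices hand_size (enumerate_possible_hand_indices hand_size)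

-- ===== LEMMAS AND PROOFS =====

-- lexicographic combinations of size s drawn from [start, n): common characterisation
def pvC (n : Int) : Nat → Int → List (List Int)
  | 0, _ => [[]]
  | s + 1, start =>
      (PySem.List.pyRange start n 1).flatMap (fun i => (pvC n s (i + 1)).map (i :: ·))

theorem pvBuild_eq (n : Int) : ∀ (r : Nat) (start : Int) (cur : List Int),
    pvBuild n r start cur = (pvC n r start).map (cur ++ ·) := by
  intro r
  induction r with
  | zero => intro start cur; simp [pvBuild, pvC]
  | succ r ih =>
      intro start cur
      simp [pvBuild, pvC, PySem.List.foldl_append_eq_flatMap, ih,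
        List.map_flatMap, List.map_map, Function.comp_def, List.flatMap_def]

theorem pvRange16 : PySem.List.pyRange 1 6 1 = [1, 2, 3, 4, 5] := by decide

-- ===== VERDICT (by name: the statement is the Claim_ definition above) =====
theorem enumerate_possible_hand_indices_spec : Claim_equal_enumerate_possible_hand_indices := by
  intro n _
  show _ = _
  unfold enumerate_possible_hand_indices enumerate_possible_hand_indices_alt
  rw [pvRange16]
  simp only [List.foldl_cons, List.foldl_nil]
  simp [pvBuild_eq, pvC, (show ((1:Int).toNat, (2:Int).toNat, (3:Int).toNat, (4:Int).toNat, (5:Int).toNat) = (1,2,3,4,5) from rfl),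
    List.flatMap_def, PySem.List.foldl_append_eq_flatMap,
    List.map_flatMap, List.map_map, Function.comp_def, List.append_assoc]
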